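-- pv_equiv track=rewrite | github.com/programmfabrik/easydb-oai-plugin | src/server/oai_modules/record.py | _eval_tagfilter_part
-- ===== SOURCE A (Python) =====
-- def _eval_tagfilter_part(tf_type, tags, tag_ids):
--     if tf_type == 'any':
--         for tag in tags:
--             if tag in tag_ids:
--                 return True
--         return False
--
--     if tf_type == 'not':
--         for tag in tags:
--             if tag in tag_ids:
--                 return False
--         return True
--
--     if tf_type == 'all':
--         for tag in tags:
--             if tag not in tag_ids:
--                 return False
--         return True
--
--     return True
-- ===== SOURCE B (Python) =====
-- def _eval_tagfilter_part(tf_type, tags, tag_ids):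
--     if tf_type not in ('any', 'not', 'all'):
--         return True
--     ids = set(tag_ids)
--     hits = sum(1 for tag in tags if tag in ids)
--     return {'any': hits > 0, 'not': hits == 0, 'all': hits == len(tags)}[tf_type]
-- ===== Notes on version B (the rewrite author's own statement) =====
-- stated objective: alternative
-- what changed: Instead of three per-mode short-circuiting membership loops, B makes one counting pass tallying how many tags hit a set built from tag_ids and decides each mode by arithmetic on that single count (hits>0 / hits==0 / hits==len(tags)) via a lookup table.
import Mathlib
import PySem

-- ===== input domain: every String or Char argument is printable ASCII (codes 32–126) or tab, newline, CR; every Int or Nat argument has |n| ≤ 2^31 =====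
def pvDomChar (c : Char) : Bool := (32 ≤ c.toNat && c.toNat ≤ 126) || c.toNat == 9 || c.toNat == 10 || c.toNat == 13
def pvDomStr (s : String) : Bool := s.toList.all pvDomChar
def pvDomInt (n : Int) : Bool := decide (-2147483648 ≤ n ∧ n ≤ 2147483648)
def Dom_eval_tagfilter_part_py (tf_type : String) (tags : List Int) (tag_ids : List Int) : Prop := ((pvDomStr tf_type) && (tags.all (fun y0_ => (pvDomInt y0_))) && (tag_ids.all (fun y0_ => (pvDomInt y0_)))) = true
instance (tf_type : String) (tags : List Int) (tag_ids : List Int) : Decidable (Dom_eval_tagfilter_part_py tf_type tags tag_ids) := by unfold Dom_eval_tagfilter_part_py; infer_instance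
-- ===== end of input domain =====

-- B replaces A's three per-mode short-circuiting membership loops by ONE counting pass
-- (how many tags hit a set built from tag_ids) and decides each mode by arithmetic on
-- that count; objective: alternative decomposition.

-- ===== PORT A =====
-- the 'any' loop: return True on the first tag found in tag_ids, else False
def pvALoopAny (tags : List Int) (tag_ids : List Int) : Bool :=
  match tags with
  | [] => false
  | tag :: rest => if tag_ids.contains tag then true else pvALoopAny rest tag_ids

-- the 'not' loop: return False on the first tag found in tag_ids, else True
def pvALoopNot (tags : List Int) (tag_ids : List Int) : Bool :=
  match tags with
  | [] => true
  | tag :: rest => if tag_ids.contains tag then false else pvALoopNot rest tag_ids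

-- the 'all' loop: return False on the first tag not in tag_ids, else True
def pvALoopAll (tags : List Int) (tag_ids : List Int) : Bool :=
  match tags with
  | [] => true
  | tag :: rest => if !(tag_ids.contains tag) then false else pvALoopAll rest tag_ids

def eval_tagfilter_part_py (tf_type : String) (tags : List Int) (tag_ids : List Int) : Bool :=
  if tf_type == "any" then pvALoopAny tags tag_ids
  else if tf_type == "not" then pvALoopNot tags tag_ids
  else if tf_type == "all" then pvALoopAll tags tag_ids
  else true

-- ===== PORT B =====
def eval_tagfilter_part_py_alt (tf_type : String) (tags : List Int) (tag_ids : List Int) : Bool :=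
  -- if tf_type not in ('any', 'not', 'all'): return True
  if !(tf_type == "any" || tf_type == "not" || tf_type == "all") then true
  else
    -- ids = set(tag_ids)
    let ids := PySem.Set.ofList tag_ids
    -- hits = sum(1 for tag in tags if tag in ids)
    let hits : Int := tags.foldl (fun acc tag => if ids.contains tag then acc + 1 else acc) 0
    -- {'any': hits > 0, 'not': hits == 0, 'all': hits == len(tags)}[tf_type]
    if tf_type == "any" then decide (hits > 0)
    else if tf_type == "not" then decide (hits = 0)
    else decide (hits = (tags.length : Int))

-- ===== PRECONDITION & SPEC =====
def Spec_eval_tagfilter_part_py (tf_type : String) (tags : List Int) (tag_ids : List Int) (out : Bool) : Prop := out = eval_tagfilter_part_py_alt tf_type tags tag_ids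
instance (tf_type : String) (tags : List Int) (tag_ids : List Int) (out : Bool) : Decidable (Spec_eval_tagfilter_part_py tf_type tags tag_ids out) := by unfold Spec_eval_tagfilter_part_py; infer_instance

-- ===== CLAIM =====
def Claim_equal_eval_tagfilter_part_py : Prop := ∀ (tf_type : String) (tags : List Int) (tag_ids : List Int), Dom_eval_tagfilter_part_py tf_type tags tag_ids → Spec_eval_tagfilter_part_py tf_type tags tag_ids (eval_tagfilter_part_py tf_type tags tag_ids)

-- ===== LEMMAS AND PROOFS =====
-- membership in set(tag_ids) is membership in tag_ids
theorem ofList_contains (tag_ids : List Int) (t : Int) :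
    (PySem.Set.ofList tag_ids).contains t = tag_ids.contains t := by
  rw [Bool.eq_iff_iff]
  simp [PySem.Set.mem_ofList]

-- B's counting fold computes acc + countP
theorem count_fold (tag_ids : List Int) (tags : List Int) (acc : Int) :
    tags.foldl (fun acc tag => if (PySem.Set.ofList tag_ids).contains tag then acc + 1 else acc) acc
      = acc + (tags.countP (fun t => decide (t ∈ tag_ids)) : Int) := by
  induction tags generalizing acc with
  | nil => simp
  | cons t rest ih =>
      rw [List.foldl_cons, List.countP_cons]
      by_cases h : (PySem.Set.ofList tag_ids).contains t = true
      · have h' : t ∈ tag_ids := by rw [ofList_contains] at h; simpa using h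
        rw [if_pos h, ih]
        simp [h']
        push_cast
        ring
      · have h' : t ∉ tag_ids := by rw [ofList_contains] at h; simpa using h
        rw [if_neg h, ih]
        simp [h']

-- A's 'any' loop answers "is the hit count positive"
theorem pvALoopAny_eq (tags tag_ids : List Int) :
    pvALoopAny tags tag_ids = decide (0 < ((tags.countP (fun t => decide (t ∈ tag_ids)) : Nat) : Int)) := by
  induction tags with
  | nil => simp [pvALoopAny]
  | cons t rest ih =>
      by_cases h : t ∈ tag_ids <;>
        simp [pvALoopAny, List.countP_cons, h, ih] <;> push_cast <;> omega

-- A's 'not' loop answers "is the hit count zero"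
theorem pvALoopNot_eq (tags tag_ids : List Int) :
    pvALoopNot tags tag_ids = decide (((tags.countP (fun t => decide (t ∈ tag_ids)) : Nat) : Int) = 0) := by
  induction tags with
  | nil => simp [pvALoopNot]
  | cons t rest ih =>
      by_cases h : t ∈ tag_ids <;>
        simp [pvALoopNot, List.countP_cons, h, ih] <;> push_cast <;> omega

-- A's 'all' loop answers "does the hit count equal the length"
theorem pvALoopAll_eq (tags tag_ids : List Int) :
    pvALoopAll tags tag_ids = decide (((tags.countP (fun t => decide (t ∈ tag_ids)) : Nat) : Int) = (tags.length : Int)) := by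
  induction tags with
  | nil => simp [pvALoopAll]
  | cons t rest ih =>
      have hle := List.countP_le_length (p := fun t => decide (t ∈ tag_ids)) (l := rest)
      by_cases h : t ∈ tag_ids <;>
        simp [pvALoopAll, List.countP_cons, h, ih] <;> push_cast <;> omega

-- ===== VERDICT =====
theorem eval_tagfilter_part_py_spec : Claim_equal_eval_tagfilter_part_py := by
  intro tf_type tags tag_ids _
  show eval_tagfilter_part_py tf_type tags tag_ids = eval_tagfilter_part_py_alt tf_type tags tag_ids
  unfold eval_tagfilter_part_py eval_tagfilter_part_py_alt
  simp only [count_fold, Int.zero_add]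
  split_ifs <;> simp_all [pvALoopAny_eq, pvALoopNot_eq, pvALoopAll_eq]
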